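-- pv_equiv track=rewrite | github.com/dsbpki/reto_primer_ciclo | reto5.py | menor_sur
-- ===== SOURCE A (Python) =====
-- def menor_sur(matriz):
--                 menor = matriz[0][0]
--                 cordenada_menor = 0
--                 for fila in range(len(matriz)):
--                     aux =matriz[fila][0]
--                     if menor > aux :
--                         menor = matriz[fila][0]
--                         cordenada_menor=fila
--                 return(cordenada_menor)
-- ===== SOURCE B (Python) =====
-- def menor_sur(matriz):
--     col = [fila[0] for fila in matriz]
--     return col.index(min(col))
-- ===== Notes on version B (the rewrite author's own statement) =====
-- stated objective: simpler
-- what changed: Replaces the fused index loop tracking (menor, cordenada_menor) by a two-pass decomposition: extract the first column as a list, take min(col), and return its first index with list.index.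
import Mathlib
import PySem

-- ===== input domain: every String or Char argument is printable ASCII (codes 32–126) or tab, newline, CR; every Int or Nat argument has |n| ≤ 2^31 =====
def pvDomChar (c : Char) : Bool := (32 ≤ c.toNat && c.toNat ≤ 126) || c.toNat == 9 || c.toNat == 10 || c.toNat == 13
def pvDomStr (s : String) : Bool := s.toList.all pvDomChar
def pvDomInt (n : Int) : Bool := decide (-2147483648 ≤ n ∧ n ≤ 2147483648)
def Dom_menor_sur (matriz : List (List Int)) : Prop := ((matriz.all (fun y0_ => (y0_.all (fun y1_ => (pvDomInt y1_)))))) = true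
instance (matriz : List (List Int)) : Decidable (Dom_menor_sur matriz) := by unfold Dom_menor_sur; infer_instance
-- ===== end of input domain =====

-- ===== PORT A =====
-- header: B replaces A's fused scan by build-the-column / min / index; equivalence on nonempty
-- matrices with nonempty rows (elsewhere both Pythons raise).
def menor_sur (matriz : List (List Int)) : Int :=
  let menor : Int := PySem.List.pyGetD (PySem.List.pyGetD matriz 0 []) 0 0
  let st :=
    (PySem.List.pyRange 0 matriz.length 1).foldl
      (fun (s : Int × Int) fila =>
        let aux := PySem.List.pyGetD (PySem.List.pyGetD matriz fila []) 0 0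
        if s.1 > aux then (aux, fila) else s)
      (menor, 0)
  st.2

-- ===== PORT B =====
def menor_sur_alt (matriz : List (List Int)) : Int :=
  let col : List Int := matriz.map (fun fila => PySem.List.pyGetD fila 0 0)
  let m : Int := (PySem.List.min? col (fun x => x)).getD 0
  ((PySem.List.index? col m).getD 0 : Int)

-- ===== PRECONDITION & SPEC =====
-- A raises IndexError on an empty matriz (matriz[0][0]) and on any empty row (fila[0]);
-- B raises there too (ValueError from min / IndexError): both are excluded.
def Pre_menor_sur (matriz : List (List Int)) : Prop :=
  matriz ≠ [] ∧ ∀ r ∈ matriz, r ≠ []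
instance (matriz : List (List Int)) : Decidable (Pre_menor_sur matriz) := by
  unfold Pre_menor_sur; infer_instance
def pvWitness_menor_sur : List (List Int) := [[3, 7], [1], [2, 5]]
def Spec_menor_sur (matriz : List (List Int)) (out : Int) : Prop := out = menor_sur_alt matriz
instance (matriz : List (List Int)) (out : Int) : Decidable (Spec_menor_sur matriz out) := by unfold Spec_menor_sur; infer_instance

-- ===== CLAIM (what is proved, stated in full; the proofs are below) =====
def Claim_equal_menor_sur : Prop := ∀ (matriz : List (List Int)), Dom_menor_sur matriz → Pre_menor_sur matriz → Spec_menor_sur matriz (menor_sur matriz)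

-- ===== LEMMAS AND PROOFS =====

-- the loop body of A, seen over (index, element) pairs of the first column
def pvStep (s : Int × Int) (p : Int × Int) : Int × Int :=
  if s.1 > p.2 then (p.2, p.1) else s

lemma pvEnumerate_map {α β : Type} (g : α → β) :
    ∀ (xs : List α) (s : Int),
      PySem.List.enumerate (xs.map g) s
        = (PySem.List.enumerate xs s).map (fun p => (p.1, g p.2)) := by
  intro xs
  induction xs with
  | nil => intro s; simp [PySem.List.enumerate_nil]
  | cons x t ih => intro s; simp [PySem.List.enumerate_cons, ih]

-- the key invariant: folding pvStep over an enumerated nonempty column, starting from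
-- (head, 0), yields (min of the column, first index of that min)
lemma pvFold_min_index :
    ∀ (col : List Int), col ≠ [] →
      (PySem.List.enumerate col 0).foldl pvStep (col.headI, 0)
        = ((PySem.List.min? col (fun x => x)).getD 0,
           ((PySem.List.index? col ((PySem.List.min? col (fun x => x)).getD 0)).getD 0 : Int)) := by
  intro col
  induction col using List.reverseRecOn with
  | nil => intro h; exact absurd rfl h
  | append_singleton l x ih =>
    intro _
    match l, ih with
    | [], _ =>
      simp [PySem.List.enumerate_cons, PySem.List.enumerate_nil, pvStep,
        PySem.List.min?_id_cons]
    | h :: t, ih =>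
      have ihe := ih (by simp)
      set m : Int := List.foldl min h t with hm
      have hminl : PySem.List.min? (h :: t) (fun y => y) = some m :=
        PySem.List.min?_id_cons h t
      have hmin2 : PySem.List.min? (h :: t ++ [x]) (fun y => y) = some (min m x) := by
        have := PySem.List.min?_id_cons h (t ++ [x])
        simpa [List.foldl_append, hm] using this
      have hmem : m ∈ h :: t := PySem.List.min?_mem hminl
      have hlow : ∀ y ∈ h :: t, m ≤ y := PySem.List.min?_isMin hminl
      have henum : PySem.List.enumerate ((h :: t) ++ [x]) 0
          = PySem.List.enumerate (h :: t) 0 ++ [(((h :: t).length : Int), x)] := by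
        simpa [PySem.List.enumerate_cons, PySem.List.enumerate_nil]
          using PySem.List.enumerate_append (h :: t) [x] 0
      rw [show (h :: t ++ [x]).headI = (h :: t).headI by simp, henum,
        List.foldl_append]
      rw [ihe]
      simp only [hminl, Option.getD_some] at *
      by_cases hcmp : m > x
      · have hxnot : x ∉ h :: t := by
          intro hx
          exact absurd (hlow x hx) (by omega)
        have hidx := PySem.List.index?_append_singleton_self (h :: t) x hxnot
        simp only [PySem.List.index?_eq_idxOf?, List.cons_append] at hidx
        rw [hmin2]
        have : min m x = x := by omega
        rw [this]
        simp [pvStep, hcmp, hidx]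
      · have hidx := PySem.List.index?_append_of_mem [x] hmem
        simp only [PySem.List.index?_eq_idxOf?, List.cons_append] at hidx
        rw [hmin2]
        have : min m x = m := by omega
        rw [this]
        simp [pvStep, hcmp, hidx]

theorem menor_sur_spec : Claim_equal_menor_sur := by
  unfold Claim_equal_menor_sur
  intro matriz _ hpre
  obtain ⟨hne, -⟩ := hpre
  unfold Spec_menor_sur menor_sur menor_sur_alt
  set g : List Int → Int := fun fila => PySem.List.pyGetD fila 0 0 with hg
  set col : List Int := matriz.map g with hcol
  have hcolne : col ≠ [] := by simpa [hcol] using hne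
  -- rewrite A's fold over pyRange as a fold of pvStep over the enumerated column
  have hfold :
      (PySem.List.pyRange 0 matriz.length 1).foldl
        (fun (s : Int × Int) fila =>
          let aux := PySem.List.pyGetD (PySem.List.pyGetD matriz fila []) 0 0
          if s.1 > aux then (aux, fila) else s)
        (PySem.List.pyGetD (PySem.List.pyGetD matriz 0 []) 0 0, 0)
      = (PySem.List.enumerate col 0).foldl pvStep (col.headI, 0) := by
    have h1 : PySem.List.enumerate col 0
        = (PySem.List.enumerate matriz 0).map (fun p => (p.1, g p.2)) :=
      pvEnumerate_map g matriz 0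
    have h2 : PySem.List.enumerate matriz 0
        = (PySem.List.pyRange 0 (PySem.List.len matriz) 1).map
            (fun j => (j, PySem.List.pyGetD matriz j [])) :=
      PySem.List.enumerate_eq_map_pyRange matriz []
    have hhead : ∀ (mz : List (List Int)),
        (mz.map g).headI = PySem.List.pyGetD (PySem.List.pyGetD mz 0 []) 0 0 := by
      intro mz
      cases mz with
      | nil => simp [hg, PySem.List.pyGetD, PySem.List.pyGet?, PySem.List.pyIdx?]
      | cons r rest => simp [hg, PySem.List.pyGetD_zero_cons]
    rw [h1, h2, List.foldl_map, List.foldl_map, hcol, hhead]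
    rfl
  show (List.foldl
      (fun (s : Int × Int) fila =>
        let aux := PySem.List.pyGetD (PySem.List.pyGetD matriz fila []) 0 0
        if s.1 > aux then (aux, fila) else s)
      (PySem.List.pyGetD (PySem.List.pyGetD matriz 0 []) 0 0, 0)
      (PySem.List.pyRange 0 matriz.length 1)).2
    = ((PySem.List.index? col ((PySem.List.min? col (fun x => x)).getD 0)).getD 0 : Int)
  rw [hfold, pvFold_min_index col hcolne]
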